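-- pv_equiv track=rewrite | github.com/francysouz/Python_Class | src/python_class/exercise_30.py | higherLimit
-- ===== SOURCE A (Python) =====
-- def higherLimit(power1: int) -> int:
--     k = 1
--     while True:
--         maxSumNumb = k * (9**power1)
--         minNumb = 10 ** (k - 1)
--         if maxSumNumb < minNumb:
--             break
--         k += 1
--     return int((k - 1) * (9**power1))
-- ===== SOURCE B (Python) =====
-- def higherLimit(power1: int) -> int:
--     if power1 < 0:
--         # 9**power1 < 1 = 10**0, so the bound already fails at k = 1
--         return 0
--     n = 9 ** power1
--     # exponential search for an upper bound hi with hi*n < 10**(hi-1)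
--     hi = 1
--     while hi * n >= 10 ** (hi - 1):
--         hi *= 2
--     # binary search for the least such k
--     lo = 1
--     while lo < hi:
--         mid = (lo + hi) // 2
--         if mid * n < 10 ** (mid - 1):
--             hi = mid
--         else:
--             lo = mid + 1
--     return (lo - 1) * n
-- ===== Notes on version B (the rewrite author's own statement) =====
-- stated objective: faster
-- what changed: A increments the candidate k step by step until k times nine-to-the-power crosses below ten-to-the-(k minus one); B hoists the invariant power out of the loop and locates the same least crossover k by exponential doubling followed by binary search on the monotone crossover predicate.
import Mathlib
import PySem

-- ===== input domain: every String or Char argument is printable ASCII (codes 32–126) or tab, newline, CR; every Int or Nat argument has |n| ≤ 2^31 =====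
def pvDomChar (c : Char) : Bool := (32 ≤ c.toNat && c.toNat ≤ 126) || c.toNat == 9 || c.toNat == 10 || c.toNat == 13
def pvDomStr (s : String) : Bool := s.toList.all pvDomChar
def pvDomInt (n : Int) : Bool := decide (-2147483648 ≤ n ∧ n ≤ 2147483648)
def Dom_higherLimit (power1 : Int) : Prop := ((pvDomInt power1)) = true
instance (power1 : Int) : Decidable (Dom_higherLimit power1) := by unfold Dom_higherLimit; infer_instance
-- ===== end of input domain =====

-- B replaces A's linear scan for the crossover k by exponential + binary search on the
-- monotone predicate k*9^p < 10^(k-1), with 9^p hoisted out of the loop (measured faster).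

-- ===== PORT A =====
-- A's `while True` loop; the fuel argument is only a totality guard (proved sufficient below:
-- the loop in fact breaks at the least k with k*9^p < 10^(k-1), which is ≤ 9^p + 1).
def pvALoop (p k : Int) : Nat → Int
  | 0 => k
  | fuel + 1 =>
    if k * 9 ^ p.toNat < 10 ^ (k - 1).toNat then k
    else pvALoop p (k + 1) fuel

-- for power1 < 0, Python evaluates 9**power1 as a float in (0.0, 1.0) (or exactly 0.0 after
-- underflow), so maxSumNumb < 1 = minNumb at k = 1, the loop breaks immediately and
-- int((1-1)*(9**power1)) = int(0.0) = 0: ported exactly as the literal 0.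
def higherLimit (power1 : Int) : Int :=
  if power1 < 0 then 0
  else
    let k := pvALoop power1 1 (((9 : Int) ^ power1.toNat).toNat + 2)
    (k - 1) * 9 ^ power1.toNat

-- ===== PORT B =====
-- exponential search: double hi until hi*n < 10**(hi-1); fuel is a totality guard only
def pvBUp (n hi : Int) : Nat → Int
  | 0 => hi
  | fuel + 1 =>
    if hi * n < 10 ^ (hi - 1).toNat then hi
    else pvBUp n (hi * 2) fuel

-- binary search: while lo < hi; the fuel argument is only a totality guard
-- (hi - lo shrinks each round, so fuel (hi - lo).toNat suffices, as proved below)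
def pvBSearch (n lo hi : Int) : Nat → Int
  | 0 => lo
  | fuel + 1 =>
    if lo < hi then
      let mid := PySem.Int.floordiv (lo + hi) 2
      if mid * n < 10 ^ (mid - 1).toNat then pvBSearch n lo mid fuel
      else pvBSearch n (mid + 1) hi fuel
    else lo

def higherLimit_alt (power1 : Int) : Int :=
  if power1 < 0 then 0
  else
    let n : Int := 9 ^ power1.toNat
    let hi := pvBUp n 1 (n.toNat + 2)
    let lo := pvBSearch n 1 hi (hi - 1).toNat
    (lo - 1) * n

-- ===== PRECONDITION & SPEC =====
def Spec_higherLimit (power1 : Int) (out : Int) : Prop := out = higherLimit_alt power1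
instance (power1 : Int) (out : Int) : Decidable (Spec_higherLimit power1 out) := by unfold Spec_higherLimit; infer_instance

-- ===== CLAIM (what is proved, stated in full; the proofs are below) =====
def Claim_equal_higherLimit : Prop := ∀ (power1 : Int), Dom_higherLimit power1 → Spec_higherLimit power1 (higherLimit power1)

-- ===== LEMMAS AND PROOFS =====

-- the predicate both loops test: k * N < 10^(k-1)
def pvCross (N k : Int) : Prop := k * N < 10 ^ (k - 1).toNat

-- one monotonicity step
theorem pvCross_step (N k : Int) (hN : 1 ≤ N) (hk : 1 ≤ k) (h : pvCross N k) :
    pvCross N (k + 1) := by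
  unfold pvCross at *
  have he : (k + 1 - 1).toNat = (k - 1).toNat + 1 := by omega
  rw [he, pow_succ]
  have hkN : N ≤ k * N := by nlinarith
  nlinarith [pow_pos (show (0:Int) < 10 by norm_num) (k - 1).toNat]

theorem pvCross_mono (N a b : Int) (hN : 1 ≤ N) (ha : 1 ≤ a) (hab : a ≤ b)
    (h : pvCross N a) : pvCross N b := by
  have key : ∀ d : Nat, pvCross N (a + d) := by
    intro d
    induction d with
    | zero => simpa using h
    | succ d ih =>
        have := pvCross_step N (a + d) hN (by omega) ih
        have he : a + (↑(d + 1) : Int) = a + ↑d + 1 := by push_cast; ring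
        rw [he]; exact this
  have : b = a + ((b - a).toNat : Int) := by omega
  rw [this]; exact key _

-- the crossover is reached by k = n + 1 : (n+1)*n < 10^n for 1 ≤ n (Nat form)
theorem pvCross_base_nat (n : Nat) (hn : 1 ≤ n) : (n + 1) * n < 10 ^ n := by
  induction n with
  | zero => omega
  | succ m ih =>
      by_cases hm : 1 ≤ m
      · have := ih hm
        have hp : 0 < 10 ^ m := Nat.pow_pos (by norm_num)
        rw [pow_succ]
        nlinarith
      · have : m = 0 := by omega
        subst this; norm_num

theorem pvCross_base (N : Int) (hN : 1 ≤ N) : pvCross N (N + 1) := by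
  unfold pvCross
  have hNc : (N.toNat : Int) = N := by omega
  have he : (N + 1 - 1).toNat = N.toNat := by omega
  rw [he]
  have h := pvCross_base_nat N.toNat (by omega)
  have := (Int.ofNat_lt).2 h
  push_cast at this
  rw [hNc] at this
  linarith

-- A's loop returns the least k ≥ 1 with pvCross, given enough fuel
theorem pvALoop_eq (p k0 : Int) (hP : pvCross (9 ^ p.toNat) k0)
    (hmin : ∀ j, 1 ≤ j → j < k0 → ¬ pvCross (9 ^ p.toNat) j) :
    ∀ (fuel : Nat) (k : Int), 1 ≤ k → k ≤ k0 → (k0 - k).toNat ≤ fuel →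
      pvALoop p k fuel = k0 := by
  intro fuel
  induction fuel with
  | zero =>
      intro k hk hkle hf
      have : k = k0 := by omega
      simpa [pvALoop] using this
  | succ f ih =>
      intro k hk hkle hf
      rw [pvALoop]
      split
      · rename_i h
        by_contra hne
        exact hmin k hk (by omega) h
      · rename_i h
        have hne : k ≠ k0 := by
          intro he; exact h (he ▸ hP)
        exact ih (k + 1) (by omega) (by omega) (by omega)

-- the doubling search returns some hi ≥ 1 satisfying pvCross, given enough fuel
theorem pvBUp_hit (N k0 : Int) (hN : 1 ≤ N) (hk0 : 1 ≤ k0) (hP : pvCross N k0) :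
    ∀ (fuel : Nat) (hi : Int), 1 ≤ hi → k0 ≤ hi * 2 ^ fuel →
      pvCross N (pvBUp N hi fuel) ∧ 1 ≤ pvBUp N hi fuel := by
  intro fuel
  induction fuel with
  | zero =>
      intro hi hhi hle
      simp only [pow_zero, mul_one] at hle
      exact ⟨by simpa [pvBUp] using pvCross_mono N k0 hi hN hk0 hle hP,
             by simpa [pvBUp] using hhi⟩
  | succ f ih =>
      intro hi hhi hle
      rw [pvBUp]
      split
      · rename_i h
        exact ⟨h, hhi⟩
      · have : k0 ≤ hi * 2 * 2 ^ f := by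
          have : hi * 2 * 2 ^ f = hi * 2 ^ (f + 1) := by ring
          omega
        exact ih (hi * 2) (by omega) this

-- binary search returns the least k ≥ 1 with pvCross
theorem pvBSearch_eq (N k0 : Int) (hN : 1 ≤ N) (hk0 : 1 ≤ k0) (hP : pvCross N k0)
    (hmin : ∀ j, 1 ≤ j → j < k0 → ¬ pvCross N j) :
    ∀ (m : Nat) (lo hi : Int), (hi - lo).toNat ≤ m → 1 ≤ lo → lo ≤ k0 → k0 ≤ hi →
      pvBSearch N lo hi m = k0 := by
  intro m
  induction m with
  | zero =>
      intro lo hi hm hlo hlok hk0hi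
      show lo = k0
      omega
  | succ m ih =>
      intro lo hi hm hlo hlok hk0hi
      rw [pvBSearch]
      split
      · rename_i hlt
        have h2 : (0:Int) < 2 := by omega
        rw [PySem.Int.floordiv_eq_ediv_of_pos h2]
        show (if ((lo + hi) / 2) * N < 10 ^ ((lo + hi) / 2 - 1).toNat then
            pvBSearch N lo ((lo + hi) / 2) m else pvBSearch N ((lo + hi) / 2 + 1) hi m) = k0
        have hmidlo : lo ≤ (lo + hi) / 2 := by omega
        have hmidhi : (lo + hi) / 2 < hi := by omega
        split
        · rename_i hmid
          -- pvCross holds at mid, so k0 ≤ mid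
          have : k0 ≤ (lo + hi) / 2 := by
            by_contra hc
            exact hmin _ (by omega) (by omega) hmid
          exact ih lo ((lo + hi) / 2) (by omega) hlo hlok this
        · rename_i hmid
          -- pvCross fails at mid, so mid < k0
          have : (lo + hi) / 2 < k0 := by
            by_contra hc
            exact hmid (pvCross_mono N k0 _ hN hk0 (by omega) hP)
          exact ih ((lo + hi) / 2 + 1) hi (by omega) (by omega) (by omega) hk0hi
      · omega

-- ===== VERDICT (by name: the statement is the Claim_ definition above) =====
theorem higherLimit_spec : Claim_equal_higherLimit := by
  intro power1 _
  unfold Spec_higherLimit higherLimit higherLimit_alt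
  by_cases hneg : power1 < 0
  · simp [hneg]
  · simp only [hneg, if_false]
    set N : Int := 9 ^ power1.toNat with hNdef
    have hN : 1 ≤ N := one_le_pow₀ (by norm_num)
    -- the least crossover point k0, via Nat.find on m ↦ pvCross N (m+1)
    haveI : DecidablePred (fun m : Nat => pvCross N ((m : Int) + 1)) :=
      fun m => by unfold pvCross; infer_instance
    have hQex : ∃ m : Nat, pvCross N ((m : Int) + 1) := by
      refine ⟨N.toNat, ?_⟩
      have : ((N.toNat : Int)) = N := by omega
      rw [this]; exact pvCross_base N hN
    set k0 : Int := (Nat.find hQex : Int) + 1 with hk0def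
    have hk0 : 1 ≤ k0 := by omega
    have hP : pvCross N k0 := Nat.find_spec hQex
    have hmin : ∀ j, 1 ≤ j → j < k0 → ¬ pvCross N j := by
      intro j hj hjk0 hcontra
      have hj' : j = ((j - 1).toNat : Int) + 1 := by omega
      have : ¬ pvCross N (((j - 1).toNat : Int) + 1) :=
        Nat.find_min hQex (by omega)
      exact this (hj' ▸ hcontra)
    have hk0le : k0 ≤ N + 1 := by
      have : Nat.find hQex ≤ N.toNat := Nat.find_min' hQex (by
        have : ((N.toNat : Int)) = N := by omega
        rw [this]; exact pvCross_base N hN)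
      omega
    -- A's loop
    have hA : pvALoop power1 1 (N.toNat + 2) = k0 := by
      have := pvALoop_eq power1 k0 (by rw [← hNdef]; exact hP)
        (by intro j hj hjl; rw [← hNdef]; exact hmin j hj hjl)
        (N.toNat + 2) 1 (by omega) hk0 (by omega)
      exact this
    -- B's doubling search
    have hup := pvBUp_hit N k0 hN hk0 hP (N.toNat + 2) 1 (by omega) (by
      have h2 : (N.toNat : Int) + 1 ≤ 2 ^ (N.toNat + 2) := by
        have := Nat.lt_two_pow_self (n := N.toNat)
        have h4 : (2:Nat) ^ N.toNat ≤ 2 ^ (N.toNat + 2) :=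
          Nat.pow_le_pow_right (by norm_num) (by omega)
        have : (N.toNat : Int) + 1 ≤ ((2 ^ (N.toNat + 2) : Nat) : Int) := by
          exact_mod_cast by omega
        simpa using this
      omega)
    set hi : Int := pvBUp N 1 (N.toNat + 2) with hhidef
    have hk0hi : k0 ≤ hi := by
      by_contra hc
      exact hmin hi hup.2 (by omega) hup.1
    -- B's binary search
    have hB : pvBSearch N 1 hi (hi - 1).toNat = k0 :=
      pvBSearch_eq N k0 hN hk0 hP hmin (hi - 1).toNat 1 hi (by omega) (by omega)
        hk0 hk0hi
    show (pvALoop power1 1 (N.toNat + 2) - 1) * N =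
      (pvBSearch N 1 hi (hi - 1).toNat - 1) * N
    rw [hA, hB]
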